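-- pv_equiv track=rewrite | github.com/dzikriinzl/MILEA | core/strategy/anti_instrumentation_posture.py | _infer_style
-- ===== SOURCE A (Python) =====
-- from typing import Dict, List
--
-- def _infer_style(
--
--     signal_freq: Dict[str, int],
--     decision_types: List[str],
-- ) -> str:
--
--     active = any(
--         s in signal_freq
--         for s in ["frida_artifact", "ptrace_check"]
--     )
--
--     passive = any(
--         s in signal_freq
--         for s in ["timing_check", "debugger_check", "proc_tracerpid"]
--     )
--
--     enforcement = any(
--         d in ["process_termination"]
--         for d in decision_types
--     )
--
--     styles = []
--
--     if passive:
--         styles.append("Passive")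
--     if active:
--         styles.append("Active")
--     if enforcement:
--         styles.append("Enforcing")
--
--     return " + ".join(styles) if styles else "None"
-- ===== SOURCE B (Python) =====
-- # Single-pass bitmask accumulation + precomputed 8-entry lookup table
-- # (instead of A's three separate any() scans and conditional appends).
-- _BIT = {
--     "timing_check": 1, "debugger_check": 1, "proc_tracerpid": 1,   # Passive -> bit 0
--     "frida_artifact": 2, "ptrace_check": 2,                        # Active  -> bit 1
-- }
-- _OUT = [
--     "None", "Passive", "Active", "Passive + Active",
--     "Enforcing", "Passive + Enforcing", "Active + Enforcing",
--     "Passive + Active + Enforcing",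
-- ]
--
--
-- def _infer_style(signal_freq, decision_types):
--     mask = 0
--     for k in signal_freq:
--         mask |= _BIT.get(k, 0)
--     for d in decision_types:
--         if d == "process_termination":
--             mask |= 4
--     return _OUT[mask]
-- ===== Notes on version B (the rewrite author's own statement) =====
-- stated objective: alternative
-- what changed: B makes one pass over the inputs accumulating a 3-bit style mask (trigger->bit dict, OR-fold) and returns a precomputed 8-entry lookup table entry, instead of A's three separate any() membership scans, conditional list appends and a join.
import Mathlib
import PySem

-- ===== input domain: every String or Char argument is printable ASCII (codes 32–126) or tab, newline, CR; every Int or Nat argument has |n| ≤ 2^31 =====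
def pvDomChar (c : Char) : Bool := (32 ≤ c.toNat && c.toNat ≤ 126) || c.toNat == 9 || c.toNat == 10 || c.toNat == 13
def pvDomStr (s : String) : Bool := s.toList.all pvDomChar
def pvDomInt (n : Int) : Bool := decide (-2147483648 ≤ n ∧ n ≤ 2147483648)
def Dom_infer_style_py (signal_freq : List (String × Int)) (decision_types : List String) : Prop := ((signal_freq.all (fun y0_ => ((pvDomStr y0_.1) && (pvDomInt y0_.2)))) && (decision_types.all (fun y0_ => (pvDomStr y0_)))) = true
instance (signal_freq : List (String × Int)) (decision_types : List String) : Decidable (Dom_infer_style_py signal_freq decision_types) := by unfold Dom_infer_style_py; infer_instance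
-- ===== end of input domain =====

-- B accumulates a 3-bit style mask in one pass over the inputs (trigger→bit dict, OR-fold)
-- and reads the answer from a precomputed 8-entry lookup table, instead of A's three
-- separate any() membership scans, conditional appends and a join (objective: alternative).

-- ===== PORT A =====
def infer_style_py (signal_freq : List (String × Int)) (decision_types : List String) : String :=
  let active := (["frida_artifact", "ptrace_check"]).any
    (fun s => (PySem.Dict.mk signal_freq).contains s)
  let passive := (["timing_check", "debugger_check", "proc_tracerpid"]).any
    (fun s => (PySem.Dict.mk signal_freq).contains s)
  let enforcement := decision_types.any
    (fun d => (["process_termination"] : List String).contains d)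
  let styles : List String := []
  let styles := if passive then styles ++ ["Passive"] else styles
  let styles := if active then styles ++ ["Active"] else styles
  let styles := if enforcement then styles ++ ["Enforcing"] else styles
  if styles ≠ [] then PySem.Str.join " + " styles else "None"

-- ===== PORT B =====
-- the module-level table _BIT (trigger → style bit) and _OUT (mask → result)
def pvBitDict : PySem.Dict String Nat := PySem.Dict.mk
  [("timing_check", 1), ("debugger_check", 1), ("proc_tracerpid", 1),
   ("frida_artifact", 2), ("ptrace_check", 2)]

def pvOut : List String :=
  ["None", "Passive", "Active", "Passive + Active",
   "Enforcing", "Passive + Enforcing", "Active + Enforcing",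
   "Passive + Active + Enforcing"]

def infer_style_py_alt (signal_freq : List (String × Int)) (decision_types : List String) : String :=
  let mask := ((PySem.Dict.mk signal_freq).keys).foldl
    (fun m k => m ||| pvBitDict.getD k 0) 0
  let mask := decision_types.foldl
    (fun m d => if d == "process_termination" then m ||| 4 else m) mask
  -- _OUT[mask]: mask < 8 always, so the index is in range and the default is never used
  (PySem.List.pyGet? pvOut (mask : Int)).getD ""

-- ===== PRECONDITION & SPEC =====
def Spec_infer_style_py (signal_freq : List (String × Int)) (decision_types : List String) (out : String) : Prop := out = infer_style_py_alt signal_freq decision_types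
instance (signal_freq : List (String × Int)) (decision_types : List String) (out : String) : Decidable (Spec_infer_style_py signal_freq decision_types out) := by unfold Spec_infer_style_py; infer_instance

-- ===== CLAIM (what is proved, stated in full; the proofs are below) =====
def Claim_equal_infer_style_py : Prop := ∀ (signal_freq : List (String × Int)) (decision_types : List String), Dom_infer_style_py signal_freq decision_types → Spec_infer_style_py signal_freq decision_types (infer_style_py signal_freq decision_types)

-- ===== LEMMAS AND PROOFS =====

-- an OR-fold over any f factors through its starting accumulator
lemma pv_fold_lor_shift (f : String → Nat) (l : List String) :
    ∀ m0 : Nat, l.foldl (fun m k => m ||| f k) m0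
      = m0 ||| l.foldl (fun m k => m ||| f k) 0 := by
  induction l with
  | nil => intro m0; simp
  | cons k t ih =>
      intro m0
      simp only [List.foldl_cons]
      rw [ih (m0 ||| f k), ih (0 ||| f k), Nat.zero_or, Nat.or_assoc]

-- the _BIT lookup, written through the two trigger lists
lemma pv_bit_eq (k : String) :
    pvBitDict.getD k 0
      = (if (["timing_check", "debugger_check", "proc_tracerpid"] : List String).contains k then 1 else 0)
          ||| (if (["frida_artifact", "ptrace_check"] : List String).contains k then 2 else 0) := by
  by_cases h1 : k = "timing_check"
  · subst h1; decide
  by_cases h2 : k = "debugger_check"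
  · subst h2; decide
  by_cases h3 : k = "proc_tracerpid"
  · subst h3; decide
  by_cases h4 : k = "frida_artifact"
  · subst h4; decide
  by_cases h5 : k = "ptrace_check"
  · subst h5; decide
  simp [pvBitDict, PySem.Dict.getD, PySem.Dict.get?, List.find?, h1, h2, h3, h4, h5,
    beq_false_of_ne (Ne.symm h1), beq_false_of_ne (Ne.symm h2), beq_false_of_ne (Ne.symm h3),
    beq_false_of_ne (Ne.symm h4), beq_false_of_ne (Ne.symm h5)]

-- bit arithmetic of one step of the signal fold
lemma pv_lor_if (pk ak pt at' : Bool) :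
    ((if pk then 1 else 0) ||| (if ak then 2 else 0))
        ||| ((if pt then 1 else 0) ||| (if at' then 2 else 0))
      = ((if (pk || pt) then 1 else 0) ||| (if (ak || at') then (2:Nat) else 0)) := by
  cases pk <;> cases ak <;> cases pt <;> cases at' <;> decide

-- the mask contributed by the signal keys: bit 0 iff a passive trigger occurs, bit 1 iff an active one
lemma pv_keys_mask (l : List String) :
    l.foldl (fun m k => m ||| pvBitDict.getD k 0) 0
      = (if l.any (fun k => (["timing_check", "debugger_check", "proc_tracerpid"] : List String).contains k) then 1 else 0)
          ||| (if l.any (fun k => (["frida_artifact", "ptrace_check"] : List String).contains k) then 2 else 0) := by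
  induction l with
  | nil => simp
  | cons k t ih =>
      simp only [List.foldl_cons, List.any_cons]
      rw [pv_fold_lor_shift, ih, Nat.zero_or, pv_bit_eq]
      exact pv_lor_if _ _ _ _

-- bit arithmetic of one step of the decision fold
lemma pv_dec_step (c e : Bool) (m0 : Nat) :
    (if c then m0 ||| 4 else m0) ||| (if e then 4 else 0)
      = m0 ||| (if (c || e) then 4 else 0) := by
  cases c <;> cases e <;> simp [Nat.or_assoc, Nat.or_self]

-- the mask contributed by the decisions: bit 2 iff "process_termination" occurs
lemma pv_dec_mask (l : List String) : ∀ m0 : Nat,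
    l.foldl (fun m d => if d == "process_termination" then m ||| 4 else m) m0
      = m0 ||| (if l.any (fun d => d == "process_termination") then 4 else 0) := by
  induction l with
  | nil => intro m0; simp
  | cons d t ih =>
      intro m0
      simp only [List.foldl_cons, List.any_cons]
      rw [ih]
      exact pv_dec_step _ _ _

-- A's "some trigger is in the dict" equals "some dict key is a trigger" (B scans the key list)
lemma pv_keys_any (trig : List String) (sf : List (String × Int)) :
    ((PySem.Dict.mk sf).keys.any (fun k => trig.contains k))
      = (trig.any (fun s => (PySem.Dict.mk sf).contains s)) := by
  rw [Bool.eq_iff_iff]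
  simp [List.any_eq_true]
  tauto

-- A's membership test 'd in ["process_termination"]' is an equality test (as in B)
lemma pv_enf_eq (dt : List String) :
    dt.any (fun d => d == "process_termination")
      = dt.any (fun d => (["process_termination"] : List String).contains d) := by
  rw [Bool.eq_iff_iff]
  simp [List.any_eq_true]

-- the 8-entry truth table: A's append/join chain equals B's _OUT lookup at the mask
lemma pv_table (P A E : Bool) :
    (let styles : List String := [];
     let styles := if P then styles ++ ["Passive"] else styles;
     let styles := if A then styles ++ ["Active"] else styles;
     let styles := if E then styles ++ ["Enforcing"] else styles;
     if styles ≠ [] then PySem.Str.join " + " styles else "None")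
      = (PySem.List.pyGet? pvOut
          ((((if P then (1:Nat) else 0) ||| (if A then 2 else 0) ||| (if E then 4 else 0)) : Nat) : Int)).getD "" := by
  cases P <;> cases A <;> cases E <;> decide

-- ===== VERDICT (by name: the statement is the Claim_ definition above) =====
theorem infer_style_py_spec : Claim_equal_infer_style_py := by
  intro sf dt _
  show infer_style_py sf dt = infer_style_py_alt sf dt
  unfold infer_style_py infer_style_py_alt
  simp only [pv_keys_mask, pv_dec_mask, pv_keys_any, pv_enf_eq]
  exact pv_table _ _ _
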